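-- pv_equiv track=rewrite | github.com/aiswaryap2408/document-qa | pages/02_RAGProcessor.py | is_html_content
-- ===== SOURCE A (Python) =====
-- def is_html_content(text: str) -> bool:
--     html_indicators = [
--         "<html", "<body", "<head",
--         "<h1", "<h2", "<h3", "<h4",
--         "<div", "<span", "<p"
--     ]
--     lower = text.lower()
--     return any(tag in lower for tag in html_indicators)
-- ===== SOURCE B (Python) =====
-- def is_html_content(text: str) -> bool:
--     tags = ("html", "body", "head", "h1", "h2", "h3", "h4", "div", "span", "p")
--     lower = text.lower()
--     return any(lower.startswith(tags, i + 1)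
--                for i, ch in enumerate(lower) if ch == "<")
-- ===== Notes on version B (the rewrite author's own statement) =====
-- stated objective: alternative
-- what changed: Instead of testing each of the ten indicator substrings against the lowered text separately, B makes a single left-to-right pass over the lowered text and, only at positions holding a less-than sign, checks via str.startswith with a tuple whether one of the ten tag names follows.
import Mathlib
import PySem

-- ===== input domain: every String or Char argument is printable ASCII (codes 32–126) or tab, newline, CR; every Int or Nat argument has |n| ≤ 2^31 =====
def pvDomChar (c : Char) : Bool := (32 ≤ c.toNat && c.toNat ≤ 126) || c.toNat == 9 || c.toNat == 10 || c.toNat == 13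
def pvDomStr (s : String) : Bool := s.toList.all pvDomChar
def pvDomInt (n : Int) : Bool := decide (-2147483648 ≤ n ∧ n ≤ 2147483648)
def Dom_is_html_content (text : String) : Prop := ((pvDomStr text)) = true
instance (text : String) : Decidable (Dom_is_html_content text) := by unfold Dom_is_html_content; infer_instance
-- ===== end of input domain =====

-- B replaces A's ten independent substring scans by one left-to-right pass that
-- checks the tag names only at '<' positions; alternative decomposition, same result.

-- ===== PORT A =====
def is_html_content (text : String) : Bool :=
  let html_indicators : List String :=
    ["<html", "<body", "<head", "<h1", "<h2", "<h3", "<h4", "<div", "<span", "<p"]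
  let lower := PySem.Str.lower text
  html_indicators.any (fun tag => PySem.Str.isIn tag lower)

-- ===== PORT B =====
def pvTagNames : List (List Char) :=
  ["html".toList, "body".toList, "head".toList, "h1".toList, "h2".toList,
   "h3".toList, "h4".toList, "div".toList, "span".toList, "p".toList]

-- the generator expression: walk the lowered chars; at each '<' test lower.startswith(tags, i+1)
def pvScan (cs : List Char) : Bool :=
  match cs with
  | [] => false
  | c :: rest =>
      (c == '<' && pvTagNames.any (fun n => PySem.Chars.startswith rest n)) || pvScan rest

def is_html_content_alt (text : String) : Bool :=
  pvScan (PySem.Chars.lower text.toList)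

-- ===== PRECONDITION & SPEC =====
def Spec_is_html_content (text : String) (out : Bool) : Prop := out = is_html_content_alt text
instance (text : String) (out : Bool) : Decidable (Spec_is_html_content text out) := by unfold Spec_is_html_content; infer_instance

-- ===== CLAIM (what is proved, stated in full; the proofs are below) =====
def Claim_equal_is_html_content : Prop := ∀ (text : String), Dom_is_html_content text → Spec_is_html_content text (is_html_content text)

-- ===== LEMMAS AND PROOFS =====

lemma pvScan_iff (cs : List Char) :
    pvScan cs = true ↔ ∃ n ∈ pvTagNames, ('<' :: n) <:+: cs := by
  induction cs with
  | nil => simp [pvScan]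
  | cons c rest ih =>
      simp only [pvScan, Bool.or_eq_true, Bool.and_eq_true, List.any_eq_true,
        PySem.Chars.startswith_iff, beq_iff_eq, ih]
      constructor
      · rintro (⟨hc, n, hn, hp⟩ | ⟨n, hn, hi⟩)
        · exact ⟨n, hn, by subst hc; exact (List.infix_cons_iff).2 (Or.inl (List.cons_prefix_cons.2 ⟨rfl, hp⟩))⟩
        · exact ⟨n, hn, hi.trans (List.suffix_cons c rest).isInfix⟩
      · rintro ⟨n, hn, hi⟩
        rcases List.infix_cons_iff.1 hi with hp | hi
        · rcases List.cons_prefix_cons.1 hp with ⟨hc, hp⟩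
          exact Or.inl ⟨hc.symm, n, hn, hp⟩
        · exact Or.inr ⟨n, hn, hi⟩

lemma pvScan_eq (cs : List Char) :
    pvScan cs = pvTagNames.any (fun n => PySem.Chars.isIn ('<' :: n) cs) := by
  rw [Bool.eq_iff_iff, pvScan_iff]
  simp [List.any_eq_true, PySem.Chars.isIn_iff_infix]

-- ===== VERDICT (by name: the statement is the Claim_ definition above) =====
theorem is_html_content_spec : Claim_equal_is_html_content := by
  intro text _
  show is_html_content text = is_html_content_alt text
  unfold is_html_content is_html_content_alt
  rw [pvScan_eq]
  simp only [pvTagNames, List.any_cons, List.any_nil, PySem.Str.isIn_eq, PySem.Str.toList_lower]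
  rfl
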